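-- pv_equiv track=rewrite | github.com/dem0NSTER/EGE | 23/47.py | f
-- ===== SOURCE A (Python) =====
-- def f(n: int, finish: int, comands: str):
--     if n == finish and comands.count('**') == 0:
--         return 1
--     if n == finish and comands.count('**') != 0:
--         return 0
--     if n > finish:
--         return 0
--     if n < finish:
--         return f(n + 1, finish, comands + '+') + f(n + 2, finish, comands + '+') + f(n * 2, finish, comands + '*')
-- ===== SOURCE B (Python) =====
-- def f(n: int, finish: int, comands: str):
--     # Bottom-up DP on (value m, whether the previous command was '*'),
--     # instead of recursion over explicit accumulated command strings.
--     if '**' in comands: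
--         return 0
--     if n > finish:
--         return 0
--     free = {finish: 1}   # ways from m when the previous command was not '*'
--     star = {finish: 1}   # ways from m when the previous command was '*'
--     m = finish - 1
--     while m >= n:
--         a = free.get(m + 1, 0) + free.get(m + 2, 0)
--         free[m] = a + star.get(2 * m, 0)
--         star[m] = a
--         m -= 1
--     return star.get(n, 0) if comands.endswith('*') else free.get(n, 0)
-- ===== Notes on version B (the rewrite author's own statement) =====
-- stated objective: alternative
-- what changed: A's recursion over explicit accumulated command strings is replaced by a bottom-up DP over states (value m, last-command-was-'*') stored in two dicts, one pass from finish down to n.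
import Mathlib
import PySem

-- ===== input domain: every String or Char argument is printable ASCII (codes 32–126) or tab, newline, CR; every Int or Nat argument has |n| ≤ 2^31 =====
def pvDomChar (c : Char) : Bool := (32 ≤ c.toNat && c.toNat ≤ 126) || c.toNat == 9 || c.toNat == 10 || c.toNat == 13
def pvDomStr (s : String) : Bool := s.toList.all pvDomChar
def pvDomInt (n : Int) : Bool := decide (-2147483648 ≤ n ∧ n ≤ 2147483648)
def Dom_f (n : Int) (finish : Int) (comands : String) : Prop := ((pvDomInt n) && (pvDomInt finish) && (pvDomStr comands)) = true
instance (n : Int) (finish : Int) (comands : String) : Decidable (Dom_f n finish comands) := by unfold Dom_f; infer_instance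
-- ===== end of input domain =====

-- B replaces A's recursion over explicit accumulated command strings by a bottom-up DP
-- on states (value m, last-command-was-'*'); equality of the return value is proved on Pre_f.

-- ===== PORT A =====
-- literal transliteration of A; the fuel only makes the recursion total (it is (finish-n).toNat,
-- which never runs out on Pre_f, where every recursive call strictly decreases finish - n)
def fAux (fuel : Nat) (n : Int) (finish : Int) (cs : List Char) : Int :=
  if n = finish ∧ PySem.Chars.count cs ['*', '*'] = 0 then 1
  else if n = finish ∧ ¬ PySem.Chars.count cs ['*', '*'] = 0 then 0
  else if finish < n then 0
  else
    match fuel with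
    | 0 => 0  -- fuel exhausted: unreachable under Pre_f
    | fuel + 1 =>
      fAux fuel (n + 1) finish (cs ++ ['+']) + fAux fuel (n + 2) finish (cs ++ ['+']) +
        fAux fuel (n * 2) finish (cs ++ ['*'])

def f (n : Int) (finish : Int) (comands : String) : Int :=
  fAux (finish - n).toNat n finish comands.toList

-- ===== PORT B =====
-- the while-loop of Source B: fills the two memo dicts from finish-1 down to n
def loopB (n : Int) (m : Int) (free star : PySem.Dict Int Int) :
    PySem.Dict Int Int × PySem.Dict Int Int :=
  if _h : n ≤ m then
    let a := free.getD (m + 1) 0 + free.getD (m + 2) 0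
    loopB n (m - 1) (free.insert m (a + star.getD (2 * m) 0)) (star.insert m a)
  else (free, star)
termination_by (m - n + 1).toNat
decreasing_by omega

def f_alt (n : Int) (finish : Int) (comands : String) : Int :=
  if PySem.Str.isIn "**" comands then 0
  else if finish < n then 0
  else
    let p := loopB n (finish - 1) ((PySem.Dict.empty).insert finish 1)
      ((PySem.Dict.empty).insert finish 1)
    if PySem.Str.endswith comands "*" then p.2.getD n 0 else p.1.getD n 0

-- ===== PRECONDITION & SPEC =====
-- Pre_f excludes exactly n ≤ 0 ∧ n < finish, where A recurses forever (n*2 does not increase a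
-- nonpositive n) and Python dies with RecursionError; A returns normally everywhere else.
def Pre_f (n : Int) (finish : Int) (comands : String) : Prop := 1 ≤ n ∨ finish ≤ n
instance (n : Int) (finish : Int) (comands : String) : Decidable (Pre_f n finish comands) := by
  unfold Pre_f; infer_instance
def pvWitness_f : Int × Int × String := (1, 4, "")

def Spec_f (n : Int) (finish : Int) (comands : String) (out : Int) : Prop := out = f_alt n finish comands
instance (n : Int) (finish : Int) (comands : String) (out : Int) : Decidable (Spec_f n finish comands out) := by unfold Spec_f; infer_instance

-- ===== CLAIM (what is proved, stated in full; the proofs are below) =====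
def Claim_equal_f : Prop := ∀ (n : Int) (finish : Int) (comands : String), Dom_f n finish comands → Pre_f n finish comands → Spec_f n finish comands (f n finish comands)

-- ===== LEMMAS AND PROOFS =====

-- `cs` contains two consecutive stars
def hasSS : List Char → Bool
  | c1 :: c2 :: t => (c1 == '*' && c2 == '*') || hasSS (c2 :: t)
  | _ => false

-- `cs` ends with a star
def lastStar (cs : List Char) : Bool := cs.getLast? == some '*'

-- the DP value: number of command sequences from m to finish with no two consecutive '*',
-- the first command forbidden to be '*' when `last` is true; fuel-indexed
def pvG : Nat → Int → Int → Bool → Int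
  | 0, finish, m, _ =>
    if m = finish then 1 else if finish < m then 0 else 0
  | fuel + 1, finish, m, last =>
    if m = finish then 1
    else if finish < m then 0
    else
      pvG fuel finish (m + 1) false + pvG fuel finish (m + 2) false +
        (if last then 0 else pvG fuel finish (m * 2) true)

lemma hasSS_iff_infix (cs : List Char) : hasSS cs = true ↔ ['*', '*'] <:+: cs := by
  induction cs with
  | nil => simp [hasSS]
  | cons c1 t ih =>
    cases t with
    | nil =>
      simp only [hasSS, List.infix_cons_iff]
      constructor
      · intro h; cases h
      · rintro (h | h)
        · have := h.length_le; simp at this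
        · have := h.length_le; simp at this
    | cons c2 t2 =>
      rw [hasSS, List.infix_cons_iff, ← ih]
      constructor
      · intro h
        rcases Bool.or_eq_true_iff.mp h with h | h
        · left
          obtain ⟨h1, h2⟩ := Bool.and_eq_true_iff.mp h
          rw [List.cons_prefix_cons, List.cons_prefix_cons]
          exact ⟨(beq_iff_eq.mp h1).symm, (beq_iff_eq.mp h2).symm, List.nil_prefix⟩
        · right; exact h
      · rintro (h | h)
        · rw [List.cons_prefix_cons, List.cons_prefix_cons] at h
          obtain ⟨h1, h2, -⟩ := h
          simp
          exact Or.inl ⟨h1.symm, h2.symm⟩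
        · simp [h]

lemma go_ge (sub : List Char) (fuel : Nat) : ∀ (l : List Char) (acc : Nat),
    acc ≤ PySem.Chars.count.go sub fuel l acc := by
  induction fuel with
  | zero => intro l acc; simp [PySem.Chars.count.go]
  | succ fuel ih =>
    intro l acc
    cases l with
    | nil => simp [PySem.Chars.count.go]
    | cons h t =>
      rw [PySem.Chars.count.go]
      split
      · exact le_trans (Nat.le_succ acc) (ih _ _)
      · exact ih _ _

lemma go_of_not_infix (fuel : Nat) : ∀ (l : List Char) (acc : Nat),
    ¬ ['*', '*'] <:+: l → PySem.Chars.count.go ['*', '*'] fuel l acc = acc := by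
  induction fuel with
  | zero => intro l acc _; simp [PySem.Chars.count.go]
  | succ fuel ih =>
    intro l acc hni
    cases l with
    | nil => simp [PySem.Chars.count.go]
    | cons h t =>
      rw [PySem.Chars.count.go]
      split
      · next hp =>
        exact absurd (List.isPrefixOf_iff_prefix.mp hp).isInfix hni
      · exact ih t acc (fun hinf => hni (List.infix_cons hinf))

lemma go_gt_of_infix (fuel : Nat) : ∀ (l : List Char) (acc : Nat),
    ['*', '*'] <:+: l → l.length ≤ fuel →
    acc < PySem.Chars.count.go ['*', '*'] fuel l acc := by
  induction fuel with
  | zero =>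
    intro l acc hinf hlen
    have := hinf.length_le
    simp at this
    omega
  | succ fuel ih =>
    intro l acc hinf hlen
    cases l with
    | nil =>
      have := hinf.length_le
      simp at this
    | cons h t =>
      rw [PySem.Chars.count.go]
      split
      · next hp =>
        exact lt_of_lt_of_le (Nat.lt_succ_self acc) (go_ge _ _ _ _)
      · next hp =>
        have hinf' : ['*', '*'] <:+: t := by
          obtain ⟨p, q, hpq⟩ := hinf
          cases p with
          | nil =>
            exfalso
            apply hp
            rw [List.isPrefixOf_iff_prefix]
            exact ⟨q, by simpa using hpq⟩
          | cons a p' =>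
            have ht : t = p' ++ ['*', '*'] ++ q := by
              have h2 := hpq
              simp at h2
              rw [h2.2.symm]
              simp
            exact ⟨p', q, ht.symm⟩
        have hlen' : t.length ≤ fuel := by simp at hlen; omega
        exact ih t acc hinf' hlen'

lemma count_ss_eq_zero_iff (cs : List Char) :
    PySem.Chars.count cs ['*', '*'] = 0 ↔ ¬ ['*', '*'] <:+: cs := by
  rw [PySem.Chars.count]
  rw [if_neg (by simp)]
  constructor
  · intro h hinf
    have := go_gt_of_infix cs.length cs 0 hinf (le_refl _)
    omega
  · intro h
    exact go_of_not_infix cs.length cs 0 h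

lemma count_ss_eq_zero_of_hasSS_false {cs : List Char} (h : hasSS cs = false) :
    PySem.Chars.count cs ['*', '*'] = 0 := by
  rw [count_ss_eq_zero_iff, ← hasSS_iff_infix, h]; simp

lemma lastStar_concat (cs : List Char) (c : Char) : lastStar (cs ++ [c]) = (c == '*') := by
  simp [lastStar]

lemma hasSS_concat (cs : List Char) (c : Char) :
    hasSS (cs ++ [c]) = (hasSS cs || (lastStar cs && c == '*')) := by
  induction cs with
  | nil => simp [hasSS, lastStar]
  | cons c1 t ih =>
    cases t with
    | nil => simp [hasSS, lastStar]
    | cons c2 t2 =>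
      rw [List.cons_append, List.cons_append, hasSS, ← List.cons_append, ih, hasSS]
      simp [lastStar, List.getLast?_cons_cons, Bool.or_assoc]

lemma endswith_star_iff (cs : List Char) :
    PySem.Chars.endswith cs ['*'] = lastStar cs := by
  by_cases h : lastStar cs = true
  · rw [h]
    rw [lastStar, beq_iff_eq, List.getLast?_eq_some_iff] at h
    obtain ⟨ys, rfl⟩ := h
    rw [PySem.Chars.endswith_iff]
    exact ⟨ys, rfl⟩
  · rw [Bool.not_eq_true] at h
    rw [h]
    rw [Bool.eq_false_iff]
    intro hc
    rw [PySem.Chars.endswith_iff] at hc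
    obtain ⟨ys, rfl⟩ := hc
    simp [lastStar] at h

-- A returns 0 everywhere once the accumulated string contains '**'
lemma fAux_of_hasSS (fuel : Nat) : ∀ (n finish : Int) (cs : List Char),
    hasSS cs = true → fAux fuel n finish cs = 0 := by
  induction fuel with
  | zero =>
    intro n finish cs hss
    have hc : ¬ PySem.Chars.count cs ['*', '*'] = 0 := by
      rw [count_ss_eq_zero_iff, not_not, ← hasSS_iff_infix]; exact hss
    rw [fAux]
    rw [if_neg (by tauto)]
    by_cases hnf : n = finish
    · rw [if_pos ⟨hnf, hc⟩]
    · rw [if_neg (by tauto)]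
      split <;> rfl
  | succ fuel ih =>
    intro n finish cs hss
    have hc : ¬ PySem.Chars.count cs ['*', '*'] = 0 := by
      rw [count_ss_eq_zero_iff, not_not, ← hasSS_iff_infix]; exact hss
    have hp : hasSS (cs ++ ['+']) = true := by
      rw [hasSS_concat, hss]; simp
    have hs : hasSS (cs ++ ['*']) = true := by
      rw [hasSS_concat, hss]; simp
    rw [fAux]
    rw [if_neg (by tauto)]
    by_cases hnf : n = finish
    · rw [if_pos ⟨hnf, hc⟩]
    · rw [if_neg (by tauto)]
      split
      · rfl
      · rw [ih _ _ _ hp, ih _ _ _ hp, ih _ _ _ hs]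
        simp

-- A computes the DP value, with `last` = "accumulated string ends in '*'"
lemma fAux_eq_pvG (fuel : Nat) : ∀ (n finish : Int) (cs : List Char),
    hasSS cs = false → fAux fuel n finish cs = pvG fuel finish n (lastStar cs) := by
  induction fuel with
  | zero =>
    intro n finish cs hss
    have hc : PySem.Chars.count cs ['*', '*'] = 0 := count_ss_eq_zero_of_hasSS_false hss
    rw [fAux, pvG]
    simp [hc]
  | succ fuel ih =>
    intro n finish cs hss
    have hc : PySem.Chars.count cs ['*', '*'] = 0 := count_ss_eq_zero_of_hasSS_false hss
    have hp : hasSS (cs ++ ['+']) = false := by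
      rw [hasSS_concat, hss]; simp
    have hlp : lastStar (cs ++ ['+']) = false := by rw [lastStar_concat]; decide
    rw [fAux, pvG]
    simp only [hc, and_true, not_true_eq_false, and_false, if_false]
    by_cases hnf : n = finish
    · rw [if_pos hnf, if_pos hnf]
    · rw [if_neg hnf, if_neg hnf]
      by_cases hfn : finish < n
      · rw [if_pos hfn, if_pos hfn]
      · rw [if_neg hfn, if_neg hfn]
        rw [ih _ _ _ hp, ih _ _ _ hp, hlp]
        cases hls : lastStar cs with
        | true =>
          have hs : hasSS (cs ++ ['*']) = true := by
            rw [hasSS_concat, hss, hls]; simp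
          rw [fAux_of_hasSS _ _ _ _ hs]
          simp
        | false =>
          have hs : hasSS (cs ++ ['*']) = false := by
            rw [hasSS_concat, hss, hls]; simp
          have hlss : lastStar (cs ++ ['*']) = true := by rw [lastStar_concat]; decide
          rw [ih _ _ _ hs, hlss]
          simp

lemma pvG_fuel_succ (fuel : Nat) : ∀ (finish m : Int) (last : Bool), 1 ≤ m →
    (finish - m).toNat ≤ fuel → pvG (fuel + 1) finish m last = pvG fuel finish m last := by
  induction fuel with
  | zero =>
    intro finish m last hm hf
    simp only [pvG]
    split_ifs <;> omega
  | succ fuel ih =>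
    intro finish m last hm hf
    by_cases h1 : m = finish
    · conv_lhs => rw [pvG]
      conv_rhs => rw [pvG]
      simp only [if_pos h1]
    · by_cases h2 : finish < m
      · conv_lhs => rw [pvG]
        conv_rhs => rw [pvG]
        simp only [if_neg h1, if_pos h2]
      · conv_lhs => rw [pvG]
        conv_rhs => rw [pvG]
        simp only [if_neg h1, if_neg h2]
        rw [ih finish (m + 1) false (by omega) (by omega),
            ih finish (m + 2) false (by omega) (by omega),
            ih finish (m * 2) true (by omega) (by omega)]

lemma pvG_add (k : Nat) : ∀ (finish m : Int) (last : Bool), 1 ≤ m →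
    pvG ((finish - m).toNat + k) finish m last = pvG (finish - m).toNat finish m last := by
  induction k with
  | zero => intro finish m last _; rfl
  | succ k ih =>
    intro finish m last hm
    have : (finish - m).toNat + (k + 1) = ((finish - m).toNat + k) + 1 := by omega
    rw [this, pvG_fuel_succ _ finish m last hm (by omega), ih finish m last hm]

lemma pvG_eq_of_le {fuel : Nat} {finish m : Int} {last : Bool} (hm : 1 ≤ m)
    (hf : (finish - m).toNat ≤ fuel) :
    pvG fuel finish m last = pvG (finish - m).toNat finish m last := by
  have : fuel = (finish - m).toNat + (fuel - (finish - m).toNat) := by omega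
  rw [this, pvG_add _ finish m last hm]

-- loop invariant: after processing down to m, both dicts agree with the DP value above m
lemma loopB_inv (finish : Int) : ∀ (n m : Int) (free star : PySem.Dict Int Int),
    1 ≤ n → n - 1 ≤ m → m < finish →
    (∀ k, free.getD k 0 = if m + 1 ≤ k then pvG (finish - k).toNat finish k false else 0) →
    (∀ k, star.getD k 0 = if m + 1 ≤ k then pvG (finish - k).toNat finish k true else 0) →
    (∀ k, (loopB n m free star).1.getD k 0 =
        if n ≤ k then pvG (finish - k).toNat finish k false else 0) ∧
    (∀ k, (loopB n m free star).2.getD k 0 =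
        if n ≤ k then pvG (finish - k).toNat finish k true else 0) := by
  intro n m
  induction hwf : (m - n + 1).toNat using Nat.strong_induction_on generalizing m with
  | _ fuel ihf =>
  intro free star hn hnm hmf hfree hstar
  subst hwf
  by_cases h : n ≤ m
  · -- one loop step
    rw [loopB, dif_pos h]
    have hd : (finish - m).toNat = (finish - (m + 1)).toNat + 1 := by omega
    have hval : free.getD (m + 1) 0 + free.getD (m + 2) 0 + star.getD (2 * m) 0 =
        pvG (finish - m).toNat finish m false := by
      rw [hfree (m + 1), hfree (m + 2), hstar (2 * m)]
      rw [if_pos (by omega), if_pos (by omega), if_pos (by omega)]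
      rw [hd, pvG, if_neg (by omega), if_neg (by omega)]
      have e2 : pvG ((finish - (m + 1)).toNat) finish (m + 2) false =
          pvG ((finish - (m + 2)).toNat) finish (m + 2) false :=
        pvG_eq_of_le (by omega) (by omega)
      have e3 : pvG ((finish - (m + 1)).toNat) finish (m * 2) true =
          pvG ((finish - (m * 2)).toNat) finish (m * 2) true :=
        pvG_eq_of_le (by omega) (by omega)
      rw [e2, e3]
      have : m * 2 = 2 * m := by ring
      rw [this]
      simp
    have hstarval : free.getD (m + 1) 0 + free.getD (m + 2) 0 =
        pvG (finish - m).toNat finish m true := by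
      rw [hfree (m + 1), hfree (m + 2)]
      rw [if_pos (by omega), if_pos (by omega)]
      rw [hd, pvG, if_neg (by omega), if_neg (by omega)]
      have e2 : pvG ((finish - (m + 1)).toNat) finish (m + 2) false =
          pvG ((finish - (m + 2)).toNat) finish (m + 2) false :=
        pvG_eq_of_le (by omega) (by omega)
      rw [e2]
      simp
    refine ihf ((m - 1) - n + 1).toNat (by omega) (m - 1) rfl _ _ hn (by omega) (by omega) ?_ ?_
    · intro k
      rw [PySem.Dict.getD_insert]
      by_cases hk : k = m
      · subst hk
        rw [if_pos rfl, if_pos (by omega), ← hval]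
      · rw [if_neg hk, hfree k]
        by_cases hk2 : m + 1 ≤ k
        · rw [if_pos hk2, if_pos (by omega)]
        · rw [if_neg hk2, if_neg (by omega)]
    · intro k
      rw [PySem.Dict.getD_insert]
      by_cases hk : k = m
      · subst hk
        rw [if_pos rfl, if_pos (by omega), ← hstarval]
      · rw [if_neg hk, hstar k]
        by_cases hk2 : m + 1 ≤ k
        · rw [if_pos hk2, if_pos (by omega)]
        · rw [if_neg hk2, if_neg (by omega)]
  · -- loop exits; m = n - 1
    rw [loopB, dif_neg h]
    have hm : m + 1 = n := by omega
    constructor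
    · intro k; rw [hfree k, hm]
    · intro k; rw [hstar k, hm]


lemma pvG_of_gt (fuel : Nat) {finish m : Int} (h : finish < m) (last : Bool) :
    pvG fuel finish m last = 0 := by
  cases fuel <;> rw [pvG, if_neg (by omega), if_pos h]

lemma init_dict (finish : Int) (b : Bool) :
    ∀ k, ((PySem.Dict.empty : PySem.Dict Int Int).insert finish 1).getD k 0 =
      if finish - 1 + 1 ≤ k then pvG (finish - k).toNat finish k b else 0 := by
  intro k
  rw [PySem.Dict.getD_insert, PySem.Dict.getD_empty]
  by_cases hk : k = finish
  · subst hk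
    rw [if_pos rfl, if_pos (by omega)]
    have h0 : (k - k).toNat = 0 := by omega
    rw [h0, pvG, if_pos rfl]
  · rw [if_neg hk]
    by_cases hk2 : finish - 1 + 1 ≤ k
    · rw [if_pos hk2, pvG_of_gt _ (by omega)]
    · rw [if_neg hk2]

-- ===== VERDICT (by name: the statement is the Claim_ definition above) =====
theorem f_spec : Claim_equal_f := by
  intro n finish comands _dom hpre
  unfold Spec_f
  unfold Pre_f at hpre
  by_cases hss : hasSS comands.toList
  · -- comands already contains '**': both sides are 0
    have hin : PySem.Str.isIn "**" comands = true := by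
      rw [PySem.Str.isIn_iff_infix]
      exact (hasSS_iff_infix _).mp hss
    rw [f, f_alt, if_pos hin, fAux_of_hasSS _ _ _ _ hss]
  · rw [Bool.not_eq_true] at hss
    have hin : PySem.Str.isIn "**" comands = false := by
      rw [Bool.eq_false_iff]
      intro hc
      rw [PySem.Str.isIn_iff_infix] at hc
      have h2 : hasSS comands.toList = true := (hasSS_iff_infix _).mpr hc
      rw [hss] at h2
      cases h2
    rw [f, f_alt, if_neg (by rw [hin]; simp)]
    rw [fAux_eq_pvG _ _ _ _ hss]
    by_cases h1 : finish < n
    · rw [if_pos h1, pvG_of_gt _ h1]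
    · rw [if_neg h1]
      have hend : PySem.Str.endswith comands "*" = lastStar comands.toList := by
        have : PySem.Str.endswith comands "*" = PySem.Chars.endswith comands.toList ['*'] := by
          simp
        rw [this, endswith_star_iff]
      by_cases h2 : n = finish
      · -- n = finish: the loop does not run, both memo dicts give 1
        subst h2
        rw [loopB, dif_neg (by omega)]
        have h0 : (n - n).toNat = 0 := by omega
        rw [h0]
        simp only [hend]
        cases hls : lastStar comands.toList <;>
          simp [pvG]
      · -- 1 ≤ n < finish: the loop invariant gives the DP value at n
        have hn1 : 1 ≤ n := by omega
        obtain ⟨hF, hS⟩ := loopB_inv finish n (finish - 1)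
          ((PySem.Dict.empty : PySem.Dict Int Int).insert finish 1)
          ((PySem.Dict.empty : PySem.Dict Int Int).insert finish 1)
          hn1 (by omega) (by omega) (init_dict finish false) (init_dict finish true)
        simp only [hend]
        cases hls : lastStar comands.toList
        · simp [hF n]
        · simp [hS n]
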